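-- pv_equiv track=rewrite | github.com/emsellem/pymusepipe | pymusepipe/prep_recipes_pipe.py | _get_combine_products
-- ===== SOURCE A (Python) =====
-- dic_products_scipost = {
--         'cube': ['DATACUBE_FINAL', 'IMAGE_FOV'],
--         'individual': ['PIXTABLE_REDUCED'],
--         'stacked': ['OBJECT_RESAMPLED'],
--         'positioned': ['PIXTABLE_POSITIONED'],
--         'combined': ['PIXTABLE_COMBINED'],
--         'skymodel': ['SKY_MASK', 'SKY_SPECTRUM',
--             'SKY_LINES', 'SKY_IMAGE'],
--         'raman': ['RAMAN_IMAGES'],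
--         'autocal': ['AUTOCAL_FACTORS']
--         }
--
-- def _get_combine_products(filter_list='white,Cousins_R'):
--     """Provide a set of key output products depending on the filters
--     for combine
--     """
--     name_products = []
--     suffix_products = []
--     suffix_prefinalnames = []
--     for prod in dic_products_scipost['cube']:
--         if prod == "IMAGE_FOV":
--             for i, value in enumerate(filter_list.split(','), start=1):
--                 suffix_products.append("_{0:04d}".format(i))
--                 suffix_prefinalnames.append("_{0}".format(value))
--                 name_products.append(prod)
--         else :
--             suffix_products.append("")
--             suffix_prefinalnames.append("")
--             name_products.append(prod)
--
--     return name_products, suffix_products, suffix_prefinalnames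
-- ===== SOURCE B (Python) =====
-- def _get_combine_products(filter_list='white,Cousins_R'):
--     """Provide a set of key output products depending on the filters
--     for combine
--     """
--     filters = filter_list.split(',')
--     n = len(filters)
--     name_products = ['DATACUBE_FINAL'] + ['IMAGE_FOV'] * n
--     suffix_products = [''] + ['_{0:04d}'.format(i) for i in range(1, n + 1)]
--     suffix_prefinalnames = [''] + ['_{0}'.format(v) for v in filters]
--     return name_products, suffix_products, suffix_prefinalnames
-- ===== Notes on version B (the rewrite author's own statement) =====
-- stated objective: simpler
-- what changed: Replaces the loop over the fixed cube-product list with its per-product branch and nested enumerate loop by computing the filter list once and building the three parallel lists directly by concatenation (constant head plus replicate/comprehension columns).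
import Mathlib
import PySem

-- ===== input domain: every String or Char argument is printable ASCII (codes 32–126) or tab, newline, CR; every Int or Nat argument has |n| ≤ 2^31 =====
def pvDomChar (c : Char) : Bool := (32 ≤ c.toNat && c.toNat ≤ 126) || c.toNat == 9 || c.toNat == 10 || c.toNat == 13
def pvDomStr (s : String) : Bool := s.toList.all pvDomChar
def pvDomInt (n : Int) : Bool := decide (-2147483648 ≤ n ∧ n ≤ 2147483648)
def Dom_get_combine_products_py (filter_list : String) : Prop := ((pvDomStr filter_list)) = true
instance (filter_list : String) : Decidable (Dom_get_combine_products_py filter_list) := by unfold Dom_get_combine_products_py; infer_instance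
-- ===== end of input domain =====

-- ===== PORT A =====
-- B builds the three result lists directly by concatenation from the split filter list,
-- instead of A's loop over the cube-product list with a branch and a nested enumerate loop (objective: simpler).

-- s.split(",") ; the separator is the non-empty literal ",", so split? is always some (getD never fires)
def pvSplit (s : String) : List String := (PySem.Str.split? s ",").getD []
-- "_{0:04d}".format(i) for i ≥ 1: "_" ++ decimal digits zero-padded to width 4 (exact for the nonnegative i this code produces)
def pvFmt4 (i : Int) : String := "_" ++ PySem.Str.zfill (PySem.Int.toStr i) 4

def get_combine_products_py (filter_list : String) : List String × List String × List String :=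
  -- state = (name_products, suffix_products, suffix_prefinalnames)
  (["DATACUBE_FINAL", "IMAGE_FOV"]).foldl
    (fun (st : List String × List String × List String) (prod : String) =>
      if prod == "IMAGE_FOV" then
        (PySem.List.enumerate (pvSplit filter_list) 1).foldl
          (fun (st2 : List String × List String × List String) (iv : Int × String) =>
            (st2.1 ++ [prod], st2.2.1 ++ [pvFmt4 iv.1], st2.2.2 ++ ["_" ++ iv.2])) st
      else
        (st.1 ++ [prod], st.2.1 ++ [""], st.2.2 ++ [""]))
    ([], [], [])

-- ===== PORT B =====
def get_combine_products_py_alt (filter_list : String) : List String × List String × List String :=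
  let filters := pvSplit filter_list
  let n := filters.length
  ("DATACUBE_FINAL" :: List.replicate n "IMAGE_FOV",
   "" :: (PySem.List.pyRange 1 ((n : Int) + 1) 1).map pvFmt4,
   "" :: filters.map (fun v => "_" ++ v))

-- ===== PRECONDITION & SPEC =====
def Spec_get_combine_products_py (filter_list : String) (out : List String × List String × List String) : Prop := out = get_combine_products_py_alt filter_list
instance (filter_list : String) (out : List String × List String × List String) : Decidable (Spec_get_combine_products_py filter_list out) := by unfold Spec_get_combine_products_py; infer_instance

-- ===== CLAIM (what is proved, stated in full; the proofs are below) =====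
def Claim_equal_get_combine_products_py : Prop := ∀ (filter_list : String), Dom_get_combine_products_py filter_list → Spec_get_combine_products_py filter_list (get_combine_products_py filter_list)

-- ===== LEMMAS AND PROOFS =====


-- the inner enumerate loop appends one entry per filter to each of the three columns, with increasing index
theorem pvInner (fs : List String) (s : Int) (a b c : List String) :
    (PySem.List.enumerate fs s).foldl
      (fun (st2 : List String × List String × List String) (iv : Int × String) =>
        (st2.1 ++ ["IMAGE_FOV"], st2.2.1 ++ [pvFmt4 iv.1], st2.2.2 ++ ["_" ++ iv.2])) (a, b, c)
    = (a ++ fs.map (fun _ => "IMAGE_FOV"),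
       b ++ (PySem.List.pyRange s (s + fs.length) 1).map pvFmt4,
       c ++ fs.map (fun v => "_" ++ v)) := by
  induction fs generalizing s a b c with
  | nil => simp [PySem.List.enumerate_nil, PySem.List.pyRange_one_eq_nil]
  | cons x xs ih =>
      rw [PySem.List.enumerate_cons, List.foldl_cons, ih,
          show s + (((x :: xs).length : Nat) : Int) = (s + 1) + (xs.length : Int) by
            push_cast [List.length_cons]; ring,
          PySem.List.pyRange_one_cons (a := s) (b := s + 1 + (xs.length : Int))
            (by have h : (0:Int) ≤ (xs.length : Int) := Int.natCast_nonneg _; omega)]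
      simp

-- ===== VERDICT (by name: the statement is the Claim_ definition above) =====
theorem get_combine_products_py_spec : Claim_equal_get_combine_products_py := by
  intro filter_list _
  unfold Spec_get_combine_products_py get_combine_products_py get_combine_products_py_alt
  simp only [List.foldl_cons, List.foldl_nil]
  norm_num
  rw [pvInner, show (1 : Int) + ((pvSplit filter_list).length : Int)
        = ((pvSplit filter_list).length : Int) + 1 by ring]
  simp [List.map_const']
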